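-- pv_equiv track=rewrite | github.com/Makereatu-Technology/makereatu-build-fbm | scripts/run_core_extraction.py | _summarize_missing
-- ===== SOURCE A (Python) =====
-- from typing import Dict, List, Any, Optional
--
-- def _get_field_value(fields: List[Dict[str, Any]], field_name: str, normalized: bool = False):
--     for f in fields:
--         if f.get("field_name") == field_name:
--             return f.get("normalized_value") if normalized else f.get("field_value")
--     return None
--
-- def _summarize_missing(fields: List[Dict[str, Any]], indicators: Dict[str, Any]) -> List[str]:
--     warnings: List[str] = []
--
--     critical_fields = [
--         "project_name",
--         "project_id",
--         "approval_date",
--         "planned_closing_date",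
--         "actual_closing_date",
--         "output_target_km",
--         "output_actual_km",
--         "err_percent",
--         "eirr_percent",
--     ]
--
--     for name in critical_fields:
--         val = _get_field_value(fields, name, normalized=True)
--         if val is None:
--             warnings.append(f"missing:{name}")
--
--     for key in ["delay_years", "delay_months", "delivery_gap_km_ratio", "economic_rate_percent"]:
--         if indicators.get(key) is None:
--             warnings.append(f"indicator_null:{key}")
--
--     return warnings
-- ===== SOURCE B (Python) =====
-- from typing import Dict, List, Any
--
-- def _summarize_missing(fields: List[Dict[str, Any]], indicators: Dict[str, Any]) -> List[str]:
--     # One reverse pass over fields with a set: walking back-to-front and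
--     # overwriting membership (add when normalized_value is present, discard when
--     # it is absent) leaves exactly the names whose FIRST occurrence carries a
--     # non-None normalized_value -- no per-name scan and no per-name index kept.
--     found = set()
--     for f in reversed(fields):
--         name = f.get("field_name")
--         if f.get("normalized_value") is not None:
--             found.add(name)
--         else:
--             found.discard(name)
--
--     critical_fields = [
--         "project_name",
--         "project_id",
--         "approval_date",
--         "planned_closing_date",
--         "actual_closing_date",
--         "output_target_km",
--         "output_actual_km",
--         "err_percent",
--         "eirr_percent",
--     ]
--
--     warnings = [f"missing:{name}" for name in critical_fields if name not in found]
--     warnings += [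
--         f"indicator_null:{key}"
--         for key in ["delay_years", "delay_months", "delivery_gap_km_ratio", "economic_rate_percent"]
--         if indicators.get(key) is None
--     ]
--     return warnings
-- ===== Notes on version B (the rewrite author's own statement) =====
-- stated objective: alternative
-- what changed: B makes a single reverse pass over fields maintaining a set with overwrite semantics (add the name when normalized_value is present, discard it when absent), so membership at the end encodes the first occurrence's status; missing warnings are then set-membership tests instead of A's per-name linear scans.
import Mathlib
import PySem

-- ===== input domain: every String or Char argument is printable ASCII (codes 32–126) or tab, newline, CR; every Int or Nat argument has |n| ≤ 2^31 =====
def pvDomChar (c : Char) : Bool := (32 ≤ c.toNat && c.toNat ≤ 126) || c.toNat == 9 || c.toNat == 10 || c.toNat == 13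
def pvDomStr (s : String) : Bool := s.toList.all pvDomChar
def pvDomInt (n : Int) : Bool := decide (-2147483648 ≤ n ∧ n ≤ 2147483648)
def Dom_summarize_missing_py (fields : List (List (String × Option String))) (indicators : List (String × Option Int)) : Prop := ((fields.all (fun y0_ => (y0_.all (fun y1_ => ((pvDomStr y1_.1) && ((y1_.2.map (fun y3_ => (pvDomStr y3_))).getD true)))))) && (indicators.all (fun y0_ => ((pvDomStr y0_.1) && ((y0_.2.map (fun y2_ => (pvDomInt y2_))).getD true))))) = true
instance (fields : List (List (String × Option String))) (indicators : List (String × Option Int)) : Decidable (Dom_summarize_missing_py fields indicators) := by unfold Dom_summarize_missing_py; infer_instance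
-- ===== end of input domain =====

-- B replaces A's per-name linear scans by ONE reverse pass over fields with an overwriting set
-- (add on non-None normalized_value, discard on None), then set-membership tests (objective: alternative).

-- ===== PORT A =====
-- port of _get_field_value: scan fields for the first dict whose "field_name" equals field_name
def get_field_value_py (fields : List (List (String × Option String))) (field_name : String) (normalized : Bool) : Option String :=
  match fields with
  | [] => none
  | f :: rest =>
    if PySem.Dict.get? (PySem.Dict.mk f) "field_name" = some (some field_name) then
      (PySem.Dict.get? (PySem.Dict.mk f) (if normalized then "normalized_value" else "field_value")).join
    else get_field_value_py rest field_name normalized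

def summarize_missing_py (fields : List (List (String × Option String))) (indicators : List (String × Option Int)) : List String :=
  let warnings : List String := []
  let critical_fields : List String :=
    ["project_name", "project_id", "approval_date", "planned_closing_date",
     "actual_closing_date", "output_target_km", "output_actual_km",
     "err_percent", "eirr_percent"]
  let warnings := critical_fields.foldl (fun w name =>
    if (get_field_value_py fields name true).isNone then w ++ ["missing:" ++ name] else w) warnings
  let warnings := ["delay_years", "delay_months", "delivery_gap_km_ratio", "economic_rate_percent"].foldl
    (fun w key =>
      if ((PySem.Dict.get? (PySem.Dict.mk indicators) key).join).isNone then w ++ ["indicator_null:" ++ key] else w) warnings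
  warnings

-- ===== PORT B =====
-- for f in reversed(fields): add name if normalized_value is not None else discard name
def found_set_alt (fields : List (List (String × Option String))) : PySem.Set (Option String) :=
  fields.reverse.foldl (fun s f =>
    if ((PySem.Dict.get? (PySem.Dict.mk f) "normalized_value").join).isSome then
      PySem.Set.add s ((PySem.Dict.get? (PySem.Dict.mk f) "field_name").join)
    else
      PySem.Set.discard s ((PySem.Dict.get? (PySem.Dict.mk f) "field_name").join)) PySem.Set.empty

def summarize_missing_py_alt (fields : List (List (String × Option String))) (indicators : List (String × Option Int)) : List String :=
  let found := found_set_alt fields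
  let critical_fields : List String :=
    ["project_name", "project_id", "approval_date", "planned_closing_date",
     "actual_closing_date", "output_target_km", "output_actual_km",
     "err_percent", "eirr_percent"]
  let warnings := (critical_fields.filter
      (fun name => !(PySem.Set.contains found (some name)))).map (fun name => "missing:" ++ name)
  warnings ++ ((["delay_years", "delay_months", "delivery_gap_km_ratio", "economic_rate_percent"].filter
      (fun key => ((PySem.Dict.get? (PySem.Dict.mk indicators) key).join).isNone)).map
      (fun key => "indicator_null:" ++ key))

-- ===== PRECONDITION & SPEC =====
def Spec_summarize_missing_py (fields : List (List (String × Option String))) (indicators : List (String × Option Int)) (out : List String) : Prop := out = summarize_missing_py_alt fields indicators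
instance (fields : List (List (String × Option String))) (indicators : List (String × Option Int)) (out : List String) : Decidable (Spec_summarize_missing_py fields indicators out) := by unfold Spec_summarize_missing_py; infer_instance

-- ===== CLAIM (what is proved, stated in full; the proofs are below) =====
def Claim_equal_summarize_missing_py : Prop := ∀ (fields : List (List (String × Option String))) (indicators : List (String × Option Int)), Dom_summarize_missing_py fields indicators → Spec_summarize_missing_py fields indicators (summarize_missing_py fields indicators)

-- ===== LEMMAS AND PROOFS =====

-- membership in the reverse-pass set encodes: the FIRST field named `name` has a non-None normalized_value
theorem mem_found_set (fields : List (List (String × Option String))) (name : String) :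
    ((some name) ∈ found_set_alt fields) ↔ (get_field_value_py fields name true).isSome := by
  induction fields with
  | nil => simp [found_set_alt, get_field_value_py, PySem.Set.empty]
  | cons f rest ih =>
    rw [found_set_alt, List.reverse_cons, List.foldl_append, List.foldl_cons, List.foldl_nil]
    rw [get_field_value_py]
    have hiff : ((PySem.Dict.get? (PySem.Dict.mk f) "field_name").join = some name)
        ↔ (PySem.Dict.get? (PySem.Dict.mk f) "field_name" = some (some name)) := by
      cases h : PySem.Dict.get? (PySem.Dict.mk f) "field_name" with
      | none => simp
      | some o => cases o <;> simp
    by_cases hk : (PySem.Dict.get? (PySem.Dict.mk f) "field_name").join = some name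
    · rw [if_pos (hiff.mp hk)]
      by_cases hv : ((PySem.Dict.get? (PySem.Dict.mk f) "normalized_value").join).isSome
      · rw [if_pos hv, PySem.Set.mem_add]
        simp [hk, hv]
      · rw [if_neg hv, PySem.Set.mem_discard]
        simp [hk]
        simpa using hv
    · rw [if_neg (fun h => hk (hiff.mpr h))]
      by_cases hv : ((PySem.Dict.get? (PySem.Dict.mk f) "normalized_value").join).isSome
      · rw [if_pos hv, PySem.Set.mem_add]
        rw [← found_set_alt] at *
        constructor
        · rintro (h | h)
          · exact ih.mp h
          · exact absurd h.symm hk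
        · intro h; exact Or.inl (ih.mpr h)
      · rw [if_neg hv, PySem.Set.mem_discard]
        rw [← found_set_alt] at *
        constructor
        · rintro ⟨h, _⟩; exact ih.mp h
        · intro h; exact ⟨ih.mpr h, fun h2 => hk h2.symm⟩

-- ===== VERDICT (by name: the statement is the Claim_ definition above) =====
theorem summarize_missing_py_spec : Claim_equal_summarize_missing_py := by
  intro fields indicators _
  show summarize_missing_py fields indicators = summarize_missing_py_alt fields indicators
  rw [summarize_missing_py, summarize_missing_py_alt]
  rw [PySem.List.foldl_append_if, PySem.List.foldl_append_if]
  have hfilter :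
      List.filter (fun name => (get_field_value_py fields name true).isNone)
        ["project_name", "project_id", "approval_date", "planned_closing_date",
         "actual_closing_date", "output_target_km", "output_actual_km",
         "err_percent", "eirr_percent"]
      = List.filter (fun name => !(PySem.Set.contains (found_set_alt fields) (some name)))
        ["project_name", "project_id", "approval_date", "planned_closing_date",
         "actual_closing_date", "output_target_km", "output_actual_km",
         "err_percent", "eirr_percent"] := by
    apply List.filter_congr
    intro name _
    have h := mem_found_set fields name
    cases hg : get_field_value_py fields name true <;>
      cases hc : PySem.Set.contains (found_set_alt fields) (some name) <;>
      simp [hg] at h ⊢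
    · exact h (((PySem.Set.contains_iff _ _).mp hc))
    · exact absurd h (by simpa using hc)
  simp only [List.nil_append]
  rw [hfilter]
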